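-- pv_equiv track=rewrite | github.com/leeo1116/Algorithms | Companies/Facebook/task_with_cool_down.py | execution_time
-- ===== SOURCE A (Python) =====
-- def execution_time(tasks, cool_down):
--     """
--     Calculate the total execution time of a given task with cool down
--     :param tasks: a string denoting tasks
--     :param cool_down: cool down time for the same task
--     :return: total execution time
--     """
--     task_index_dict = {}  # {task: index in execution list + 1 = exe_time}
--     exe_time = 0
--     for t in tasks:
--         if t in task_index_dict and exe_time - (task_index_dict[t] - 1) <= cool_down:
--             exe_time += (cool_down - (exe_time - task_index_dict[t]))
--         exe_time += 1
--         task_index_dict[t] = exe_time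
--     return exe_time
-- ===== SOURCE B (Python) =====
-- def execution_time(tasks, cool_down):
--     # pass 1: previous-occurrence index of each position (-1 if none)
--     last = {}
--     prev = []
--     for i, t in enumerate(tasks):
--         prev.append(last.get(t, -1))
--         last[t] = i
--     # pass 2: schedule each position from the slot of its previous occurrence
--     slots = []
--     time = 0
--     for p in prev:
--         time = max(time + 1, slots[p] + cool_down + 1) if p >= 0 else time + 1
--         slots.append(time)
--     return time
-- ===== Notes on version B (the rewrite author's own statement) =====
-- stated objective: alternative
-- what changed: Replaces A's single pass with a last-exe-time dict and conditional idle-time arithmetic by two staged passes: first build a previous-occurrence index array, then schedule positions array-to-array from the slot of each previous occurrence (no dict in the scheduling loop).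
import Mathlib
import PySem

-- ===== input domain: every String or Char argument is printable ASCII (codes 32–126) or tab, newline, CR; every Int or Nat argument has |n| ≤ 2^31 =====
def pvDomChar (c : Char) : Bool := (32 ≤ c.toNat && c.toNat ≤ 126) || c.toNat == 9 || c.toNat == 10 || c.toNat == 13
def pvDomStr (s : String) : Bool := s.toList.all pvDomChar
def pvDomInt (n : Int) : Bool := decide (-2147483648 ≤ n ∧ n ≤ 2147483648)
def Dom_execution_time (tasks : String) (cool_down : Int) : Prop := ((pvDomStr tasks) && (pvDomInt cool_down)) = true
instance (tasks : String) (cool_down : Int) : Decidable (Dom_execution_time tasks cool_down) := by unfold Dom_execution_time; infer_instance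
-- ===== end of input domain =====

-- B replaces A's one-pass dict-with-conditional-idle-arithmetic by two staged passes over arrays
-- (previous-occurrence indices, then slots); objective: alternative structure, same cost.

-- ===== PORT A =====
-- one step of A's loop body: optional cooldown padding, then execute and record exe_time
def etStepA (cool_down : Int) (st : PySem.Dict Char Int × Int) (t : Char) :
    PySem.Dict Char Int × Int :=
  let e :=
    match st.1.get? t with
    | some idx => if st.2 - (idx - 1) ≤ cool_down then st.2 + (cool_down - (st.2 - idx)) else st.2
    | none => st.2
  let e := e + 1
  (st.1.insert t e, e)

def execution_time (tasks : String) (cool_down : Int) : Int :=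
  (tasks.toList.foldl (etStepA cool_down) (PySem.Dict.empty, 0)).2

-- ===== PORT B =====
-- pass 1 step: prev.append(last.get(t, -1)); last[t] = i
def etPrevStep (st : PySem.Dict Char Int × List Int) (p : Int × Char) :
    PySem.Dict Char Int × List Int :=
  (st.1.insert p.2 p.1, st.2 ++ [st.1.getD p.2 (-1)])

-- pass 2 step: time = max(time+1, slots[p]+cool_down+1) if p >= 0 else time+1; slots.append(time)
-- (slots[p] via pyGet?; the .getD 0 arm is unreachable since pass 1 only emits in-range indices)
def etSlotStep (cool_down : Int) (st : List Int × Int) (p : Int) : List Int × Int :=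
  let time := if 0 ≤ p then max (st.2 + 1) ((PySem.List.pyGet? st.1 p).getD 0 + cool_down + 1)
              else st.2 + 1
  (st.1 ++ [time], time)

def execution_time_alt (tasks : String) (cool_down : Int) : Int :=
  let prev := ((PySem.List.enumerate tasks.toList 0).foldl etPrevStep (PySem.Dict.empty, [])).2
  (prev.foldl (etSlotStep cool_down) ([], 0)).2

-- ===== PRECONDITION & SPEC =====
def Spec_execution_time (tasks : String) (cool_down : Int) (out : Int) : Prop := out = execution_time_alt tasks cool_down
instance (tasks : String) (cool_down : Int) (out : Int) : Decidable (Spec_execution_time tasks cool_down out) := by unfold Spec_execution_time; infer_instance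

-- ===== CLAIM (what is proved, stated in full; the proofs are below) =====
def Claim_equal_execution_time : Prop := ∀ (tasks : String) (cool_down : Int), Dom_execution_time tasks cool_down → Spec_execution_time tasks cool_down (execution_time tasks cool_down)

-- ===== LEMMAS AND PROOFS =====

-- pure view of pass 1's output (prev list) as a structural recursion
def etPrevPure (d : PySem.Dict Char Int) : List (Int × Char) → List Int
  | [] => []
  | p :: r => d.getD p.2 (-1) :: etPrevPure (d.insert p.2 p.1) r

theorem etPrevStep_eq_pure (l : List (Int × Char)) :
    ∀ (d : PySem.Dict Char Int) (acc : List Int),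
      (l.foldl etPrevStep (d, acc)).2 = acc ++ etPrevPure d l := by
  induction l with
  | nil => intro d acc; simp [etPrevPure]
  | cons p r ih =>
    intro d acc
    simp only [List.foldl_cons, etPrevStep, etPrevPure, ih]
    simp

-- main invariant: A's dict maps each char to the slot stored at its last-occurrence index,
-- those indices being exactly what pass 1's dict records, all within the slots built so far.
theorem et_main (cool_down : Int) :
    ∀ (ys : List Char) (k : Int) (dIdx dA : PySem.Dict Char Int) (slots : List Int) (e : Int),
      k = (slots.length : Int) →
      (∀ c i, dIdx.get? c = some i → 0 ≤ i ∧ i < (slots.length : Int)) →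
      (∀ c, dA.get? c = (dIdx.get? c).bind (fun i => PySem.List.pyGet? slots i)) →
      (ys.foldl (etStepA cool_down) (dA, e)).2
        = ((etPrevPure dIdx (PySem.List.enumerate ys k)).foldl (etSlotStep cool_down) (slots, e)).2 := by
  intro ys
  induction ys with
  | nil => intro k dIdx dA slots e _ _ _; simp [PySem.List.enumerate_nil, etPrevPure]
  | cons t r ih =>
    intro k dIdx dA slots e hk hbnd hmap
    rw [PySem.List.enumerate_cons]
    simp only [List.foldl_cons, etPrevPure]
    -- compute both step results
    have hgd := PySem.Dict.getD_eq_get?_getD (d := dIdx) (k := t) (d0 := (-1 : Int))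
    cases hidx : dIdx.get? t with
    | none =>
      have hA : dA.get? t = none := by rw [hmap t, hidx]; rfl
      have hp : dIdx.getD t (-1) = (-1 : Int) := by rw [hgd, hidx]; rfl
      have hstepA : etStepA cool_down (dA, e) t = (dA.insert t (e + 1), e + 1) := by
        simp [etStepA, hA]
      have hstepB : etSlotStep cool_down (slots, e) (dIdx.getD t (-1))
          = (slots ++ [e + 1], e + 1) := by
        rw [hp]; simp [etSlotStep]
      rw [hstepA, hstepB]
      apply ih (k + 1) (dIdx.insert t k) _ _ (e + 1)
      · simp; omega
      · intro c i hc
        rw [PySem.Dict.get?_insert] at hc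
        by_cases hct : c = t
        · simp [hct] at hc; simp [List.length_append]; omega
        · simp [hct] at hc
          have := hbnd c i hc
          simp [List.length_append]; omega
      · intro c
        rw [PySem.Dict.get?_insert, PySem.Dict.get?_insert]
        by_cases hct : c = t
        · subst hct
          simp [hk]
        · simp only [if_neg hct]
          rw [hmap c]
          cases hc : dIdx.get? c with
          | none => rfl
          | some i =>
            have hb := hbnd c i hc
            simp only [Option.bind]
            have h0 : 0 ≤ i := hb.1
            have h1 : i.toNat < slots.length := by omega
            rw [PySem.List.pyGet?_of_nonneg _ h0, PySem.List.pyGet?_of_nonneg _ h0]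
            rw [List.getElem?_append_left h1]
    | some i =>
      have hb := hbnd t i hidx
      have h0 : 0 ≤ i := hb.1
      have h1 : i.toNat < slots.length := by omega
      have hA : dA.get? t = some (slots[i.toNat]) := by
        rw [hmap t, hidx]
        simp only [Option.bind]
        rw [PySem.List.pyGet?_of_nonneg _ h0, List.getElem?_eq_getElem h1]
      have hp : dIdx.getD t (-1) = i := by rw [hgd, hidx]; rfl
      set v := slots[i.toNat] with hv
      have hstepA : etStepA cool_down (dA, e) t
          = (dA.insert t (max (e + 1) (v + cool_down + 1)),
             max (e + 1) (v + cool_down + 1)) := by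
        simp only [etStepA, hA]
        have : (if e - (v - 1) ≤ cool_down then e + (cool_down - (e - v)) else e) + 1
            = max (e + 1) (v + cool_down + 1) := by
          split_ifs with h <;> [skip; skip] <;> simp [max_def] <;> omega
        rw [this]
      have hstepB : etSlotStep cool_down (slots, e) (dIdx.getD t (-1))
          = (slots ++ [max (e + 1) (v + cool_down + 1)], max (e + 1) (v + cool_down + 1)) := by
        rw [hp]
        simp only [etSlotStep, if_pos h0]
        rw [PySem.List.pyGet?_of_nonneg _ h0, List.getElem?_eq_getElem h1]
        rfl
      rw [hstepA, hstepB]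
      set m := max (e + 1) (v + cool_down + 1) with hm
      apply ih (k + 1) (dIdx.insert t k) _ _ m
      · simp; omega
      · intro c j hc
        rw [PySem.Dict.get?_insert] at hc
        by_cases hct : c = t
        · simp [hct] at hc; simp [List.length_append]; omega
        · simp [hct] at hc
          have := hbnd c j hc
          simp [List.length_append]; omega
      · intro c
        rw [PySem.Dict.get?_insert, PySem.Dict.get?_insert]
        by_cases hct : c = t
        · subst hct
          simp [hk]
        · simp only [if_neg hct]
          rw [hmap c]
          cases hc : dIdx.get? c with
          | none => rfl
          | some j =>
            have hbj := hbnd c j hc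
            simp only [Option.bind]
            have hj0 : 0 ≤ j := hbj.1
            have hj1 : j.toNat < slots.length := by omega
            rw [PySem.List.pyGet?_of_nonneg _ hj0, PySem.List.pyGet?_of_nonneg _ hj0]
            rw [List.getElem?_append_left hj1]

-- ===== VERDICT (by name: the statement is the Claim_ definition above) =====
theorem execution_time_spec : Claim_equal_execution_time := by
  intro tasks cool_down _
  unfold Spec_execution_time execution_time execution_time_alt
  rw [etPrevStep_eq_pure, List.nil_append]
  exact et_main cool_down tasks.toList 0 PySem.Dict.empty PySem.Dict.empty [] 0
    (by simp) (fun c i h => by simp [PySem.Dict.get?_empty] at h)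
    (fun c => by simp [PySem.Dict.get?_empty])
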